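-- pv_equiv track=rewrite | github.com/Mithzzx/CP-Solution-Vault | Leetcode/2025/12 December/3623. Count Number of Trapezoids I.py | countTrapezoids
-- ===== SOURCE A (Python) =====
-- from collections import Counter
--
-- def countTrapezoids(points) -> int:
--     freq = Counter(p[1] for p in points)
--     Sum, c2 = 0, 0
--     for f in freq.values():
--         if f <= 1: continue
--         c = f * (f - 1) // 2
--         Sum += c
--         c2 += c * c
--     return (Sum * Sum - c2) // 2 % (10 ** 9 + 7)
-- ===== SOURCE B (Python) =====
-- def countTrapezoids(points) -> int:
--     freq = {}
--     for p in points: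
--         y = p[1]
--         freq[y] = freq.get(y, 0) + 1
--     vals = list(freq.values())
--     ans = total = 0
--     while vals:
--         f = vals.pop()
--         if f >= 2:
--             c = f * (f - 1) // 2
--             ans += c * total
--             total += c
--     return ans % (10 ** 9 + 7)
-- ===== Notes on version B (the rewrite author's own statement) =====
-- stated objective: alternative
-- what changed: Replaces Counter plus the ((sum c)^2 - sum c^2)//2 identity by an explicit dict.get counting loop and a back-to-front while/pop consumption of the value list that accumulates the cross products ans += c*total directly, so no squares and no final halving are needed.
import Mathlib
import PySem

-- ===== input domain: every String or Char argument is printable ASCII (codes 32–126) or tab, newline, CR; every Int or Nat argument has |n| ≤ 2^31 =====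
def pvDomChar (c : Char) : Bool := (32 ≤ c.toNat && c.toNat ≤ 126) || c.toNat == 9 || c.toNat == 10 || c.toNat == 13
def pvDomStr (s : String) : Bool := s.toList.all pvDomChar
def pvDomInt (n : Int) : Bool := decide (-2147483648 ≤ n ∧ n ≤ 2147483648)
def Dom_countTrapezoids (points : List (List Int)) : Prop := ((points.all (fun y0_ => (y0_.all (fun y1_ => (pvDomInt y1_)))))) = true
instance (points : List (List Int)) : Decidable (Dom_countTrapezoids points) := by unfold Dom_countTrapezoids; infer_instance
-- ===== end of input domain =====

-- B replaces Counter + the ((Σc)² − Σc²)//2 identity by an explicit dict.get counting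
-- loop and a back-to-front while/pop accumulation of cross products (objective: alternative).


-- ===== PORT A =====
-- p[1] is ported as pyGetD p 1 0: Pre_countTrapezoids guarantees 2 ≤ p.length, on which
-- pyGetD agrees with Python's p[1] (outside Pre_ Python raises IndexError).
def countTrapezoids (points : List (List Int)) : Int :=
  let freq := PySem.Dict.counter (points.map (fun p => PySem.List.pyGetD p 1 0))
  let r := freq.values.foldl (fun (sc : Int × Int) f =>
      if f ≤ 1 then sc
      else
        let c := PySem.Int.floordiv (f * (f - 1)) 2
        (sc.1 + c, sc.2 + c * c)) (0, 0)
  PySem.Int.mod (PySem.Int.floordiv (r.1 * r.1 - r.2) 2) (10 ^ 9 + 7)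

-- ===== PORT B =====
-- The while/pop loop of Source B consumes the value list back to front; ported as the
-- structural recursion that computes the tail's (ans, total) first and then adds the
-- head's contribution — element processing order and state are exactly the pop order.
def pvPopLoop : List Int → Int × Int
  | [] => (0, 0)
  | f :: rest =>
      let at_ := pvPopLoop rest
      if f ≥ 2 then
        let c := PySem.Int.floordiv (f * (f - 1)) 2
        (at_.1 + c * at_.2, at_.2 + c)
      else at_

def countTrapezoids_alt (points : List (List Int)) : Int :=
  let freq := points.foldl (fun (d : PySem.Dict Int Int) p =>
      let y := PySem.List.pyGetD p 1 0
      d.insert y (d.getD y 0 + 1)) PySem.Dict.empty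
  let r := pvPopLoop freq.values
  PySem.Int.mod r.1 (10 ^ 9 + 7)

-- ===== PRECONDITION & SPEC =====
-- Pre_ excludes exactly the inputs where some point has fewer than 2 coordinates, on which p[1] raises IndexError in A.
def Pre_countTrapezoids (points : List (List Int)) : Prop := ∀ p ∈ points, 2 ≤ p.length
instance (points : List (List Int)) : Decidable (Pre_countTrapezoids points) := by unfold Pre_countTrapezoids; infer_instance
def pvWitness_countTrapezoids : List (List Int) := [[0,1],[2,1],[0,3],[5,3],[1,7]]

def Spec_countTrapezoids (points : List (List Int)) (out : Int) : Prop := out = countTrapezoids_alt points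
instance (points : List (List Int)) (out : Int) : Decidable (Spec_countTrapezoids points out) := by unfold Spec_countTrapezoids; infer_instance

-- ===== CLAIM (what is proved, stated in full; proofs below) =====
def Claim_equal_countTrapezoids : Prop := ∀ (points : List (List Int)), Dom_countTrapezoids points → Pre_countTrapezoids points → Spec_countTrapezoids points (countTrapezoids points)

-- ===== LEMMAS AND PROOFS =====

-- Contribution of one frequency (0 when f < 2).
def pvC (f : Int) : Int := if f ≥ 2 then PySem.Int.floordiv (f * (f - 1)) 2 else 0

-- A's fold computes the accumulated sums of pvC and pvC².
theorem pv_foldA (vs : List Int) (S Q : Int) :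
    vs.foldl (fun (sc : Int × Int) f =>
      if f ≤ 1 then sc
      else
        let c := PySem.Int.floordiv (f * (f - 1)) 2
        (sc.1 + c, sc.2 + c * c)) (S, Q)
      = (S + (vs.map pvC).sum, Q + (vs.map (fun f => pvC f * pvC f)).sum) := by
  induction vs generalizing S Q with
  | nil => simp
  | cons f vs ih =>
    by_cases hf : f ≤ 1
    · simp only [List.foldl_cons, if_pos hf, ih, List.map_cons, List.sum_cons,
        pvC, if_neg (by omega : ¬ f ≥ 2)]
      ring_nf
    · simp only [List.foldl_cons, if_neg hf, ih, List.map_cons, List.sum_cons,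
        pvC, if_pos (by omega : f ≥ 2)]
      simp only [Prod.mk.injEq]
      constructor <;> ring

-- B's pop loop returns (ans, total) with total = Σ pvC and 2·ans = total² − Σ pvC².
theorem pv_popLoop_char (vs : List Int) :
    (pvPopLoop vs).2 = (vs.map pvC).sum ∧
    2 * (pvPopLoop vs).1 = (vs.map pvC).sum * (vs.map pvC).sum
      - (vs.map (fun f => pvC f * pvC f)).sum := by
  induction vs with
  | nil => simp [pvPopLoop]
  | cons f vs ih =>
    obtain ⟨h1, h2⟩ := ih
    rcases hp : pvPopLoop vs with ⟨ans, total⟩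
    rw [hp] at h1 h2
    subst h1
    simp only [pvPopLoop, hp, List.map_cons, List.sum_cons]
    by_cases hf : f ≥ 2
    · have hc : pvC f = PySem.Int.floordiv (f * (f - 1)) 2 := if_pos hf
      rw [if_pos hf, hc]
      dsimp only
      exact ⟨by ring, by linear_combination h2⟩
    · have hc : pvC f = 0 := if_neg hf
      rw [if_neg hf, hc]
      dsimp only
      exact ⟨by ring, by linear_combination h2⟩

-- B's explicit dict.get counting loop builds exactly Counter(map).
theorem pv_freq_eq (points : List (List Int)) :
    points.foldl (fun (d : PySem.Dict Int Int) p =>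
        let y := PySem.List.pyGetD p 1 0
        d.insert y (d.getD y 0 + 1)) PySem.Dict.empty
      = PySem.Dict.counter (points.map (fun p => PySem.List.pyGetD p 1 0)) := by
  rw [← PySem.Dict.foldl_insert_getD_add_one_eq_counter, List.foldl_map]

theorem countTrapezoids_eq (points : List (List Int)) :
    countTrapezoids points = countTrapezoids_alt points := by
  unfold countTrapezoids countTrapezoids_alt
  rw [pv_freq_eq]
  set vs := (PySem.Dict.counter (points.map (fun p => PySem.List.pyGetD p 1 0))).values with hvs
  obtain ⟨h1, h2⟩ := pv_popLoop_char vs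
  simp only [pv_foldA, zero_add]
  rw [← h2, PySem.Int.floordiv_eq_ediv_of_pos (by omega)]
  rw [Int.mul_ediv_cancel_left _ (by omega : (2:Int) ≠ 0)]

-- ===== VERDICT (by name: the statement is the Claim_ definition above) =====
theorem countTrapezoids_spec : Claim_equal_countTrapezoids := by
  intro points _ _
  exact countTrapezoids_eq points
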